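-- pv_equiv track=rewrite | github.com/teagh82/coding_study | coding_study_python/크레인 인형뽑기 게임.py | solution
-- ===== SOURCE A (Python) =====
-- def solution(board, moves):
--     answer = 0
--     bucket = []
--     board_change = list(map(list, zip(*board)))
--     for i in board_change:
--         while 0 in i:
--             i.remove(0)
--
--     for i in moves:
--         if board_change[i-1]:
--             bucket.append(board_change[i-1].pop(0))
--
--         if len(bucket) >= 2 and bucket[-2] == bucket[-1]:
--             bucket.pop()
--             bucket.pop()
--             answer += 2
--
--     return answer
-- ===== SOURCE B (Python) =====
-- def solution(board, moves):
--     # Scan a working copy of the board per move (topmost non-zero cell in the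
--     # column), cancelling against the top of the stack; board is never mutated.
--     n = min(map(len, board), default=0)
--     grid = [row[:n] for row in board]
--     answer = 0
--     bucket = []
--     for m in moves:
--         for row in grid:
--             v = row[m - 1]
--             if v != 0:
--                 row[m - 1] = 0
--                 if bucket and bucket[-1] == v:
--                     bucket.pop()
--                     answer += 2
--                 else:
--                     bucket.append(v)
--                 break
--     return answer
-- ===== Notes on version B (the rewrite author's own statement) =====
-- stated objective: simpler
-- what changed: B drops A's transpose-and-strip-zeros preprocessing: it copies the board once and, per move, scans the column top-down for the first non-zero cell, zeroing it and cancelling against the stack top directly.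
import Mathlib
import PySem

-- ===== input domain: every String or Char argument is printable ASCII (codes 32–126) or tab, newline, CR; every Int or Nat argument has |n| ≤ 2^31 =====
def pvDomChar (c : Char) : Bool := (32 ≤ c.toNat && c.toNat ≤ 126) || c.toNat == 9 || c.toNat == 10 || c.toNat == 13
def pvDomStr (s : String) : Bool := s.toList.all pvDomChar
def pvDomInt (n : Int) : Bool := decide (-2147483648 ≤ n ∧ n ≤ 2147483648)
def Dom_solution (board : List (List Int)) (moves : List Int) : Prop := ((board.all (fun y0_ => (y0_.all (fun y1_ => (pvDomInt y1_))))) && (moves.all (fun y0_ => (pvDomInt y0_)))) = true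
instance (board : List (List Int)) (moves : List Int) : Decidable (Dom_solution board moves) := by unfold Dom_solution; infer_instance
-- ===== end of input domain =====

-- B replaces A's transpose-and-strip preprocessing with a per-move top-down column scan on a
-- copy of the board (simpler, no speed claim); A does not mutate its arguments, nor does B.

-- ===== PORT A =====
-- length of zip(*board) = length of the shortest row (board nonempty)
def minLenA (r : List Int) (rs : List (List Int)) : Nat :=
  rs.foldl (fun m row => min m row.length) r.length

-- list(map(list, zip(*board)))
def zipStar (board : List (List Int)) : List (List Int) :=
  match board with
  | [] => []
  | r :: rs => (List.range (minLenA r rs)).map (fun j => board.map (fun row => row.getD j 0))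

-- while 0 in i: i.remove(0)
def stripZeros (l : List Int) : List Int :=
  if h : (0 : Int) ∈ l then
    stripZeros (l.erase 0)   -- i.remove(0) = erase the first 0 (PySem.List.remove?_eq_some_erase)
  else l
termination_by l.length
decreasing_by have := List.length_erase_of_mem h; have : 0 < l.length := List.length_pos_of_mem h; omega

-- the 'if len(bucket) >= 2 and bucket[-2] == bucket[-1]' block
def checkA (ans : Int) (bucket : List Int) : Int × List Int :=
  if bucket.length ≥ 2 ∧ PySem.List.pyGetD bucket (-2) 0 = PySem.List.pyGetD bucket (-1) 0 then
    (ans + 2, bucket.dropLast.dropLast)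
  else (ans, bucket)

-- one iteration of A's 'for i in moves' loop; state = (answer, bucket, board_change)
def stepA (st : Int × List Int × List (List Int)) (i : Int) : Int × List Int × List (List Int) :=
  let (ans, bucket, cols) := st
  match PySem.List.pyGet? cols (i - 1) with
  | none => st        -- IndexError in Python: outside Pre_, value unclaimed
  | some col =>
    match col with
    | [] =>
      let (ans', bucket') := checkA ans bucket
      (ans', bucket', cols)
    | v :: rest =>
      let cols' := PySem.List.pySetD cols (i - 1) rest   -- .pop(0) mutates the column in place
      let (ans', bucket') := checkA ans (bucket ++ [v])
      (ans', bucket', cols')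

def solution (board : List (List Int)) (moves : List Int) : Int :=
  let board_change := (zipStar board).map stripZeros
  (moves.foldl stepA (0, [], board_change)).1

-- ===== PORT B =====
-- min(map(len, board), default=0)
def minLenB (board : List (List Int)) : Nat :=
  match board.map List.length with
  | [] => 0
  | x :: xs => xs.foldl min x

-- the inner 'for row in grid' scan: first row whose cell at column index i is non-zero;
-- returns the updated grid (that cell zeroed) and the value, or none if no such row
def pluck (i : Int) : List (List Int) → Option (List (List Int) × Int)
  | [] => none
  | r :: rs =>
    match PySem.List.pyGet? r i with
    | none => none      -- IndexError in Python: outside Pre_, value unclaimed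
    | some v =>
      if v ≠ 0 then some (PySem.List.pySetD r i 0 :: rs, v)
      else
        match pluck i rs with
        | some (rs', w) => some (r :: rs', w)
        | none => none

-- one move; the bucket stack is kept head-first (head = Python bucket[-1])
def stepB (st : Int × List Int × List (List Int)) (m : Int) : Int × List Int × List (List Int) :=
  let (ans, bucket, grid) := st
  match pluck (m - 1) grid with
  | none => st
  | some (grid', v) =>
    match bucket with
    | t :: bs => if t = v then (ans + 2, bs, grid') else (ans, v :: t :: bs, grid')
    | [] => (ans, [v], grid')

def solution_alt (board : List (List Int)) (moves : List Int) : Int :=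
  let n := minLenB board
  let grid := board.map (fun row => row.take n)
  (moves.foldl stepB (0, [], grid)).1

-- ===== PRECONDITION & SPEC =====
-- Pre_ excludes exactly the inputs where A raises IndexError: some move's column index
-- m-1 falls outside the columns of zip(*board) (= the shortest row).
def Pre_solution (board : List (List Int)) (moves : List Int) : Prop :=
  ∀ m ∈ moves, PySem.Raise.InRange (((board.map List.length).min?).getD 0) (m - 1)
instance (board : List (List Int)) (moves : List Int) : Decidable (Pre_solution board moves) := by
  unfold Pre_solution; infer_instance

def pvWitness_solution : List (List Int) × List Int :=
  ([[0, 1], [1, 1], [2, 2]], [1, 1, 2, 2, 1])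

def Spec_solution (board : List (List Int)) (moves : List Int) (out : Int) : Prop := out = solution_alt board moves
instance (board : List (List Int)) (moves : List Int) (out : Int) : Decidable (Spec_solution board moves out) := by unfold Spec_solution; infer_instance

-- ===== CLAIM (what is proved, stated in full; the proofs are below) =====
def Claim_equal_solution : Prop := ∀ (board : List (List Int)) (moves : List Int), Dom_solution board moves → Pre_solution board moves → Spec_solution board moves (solution board moves)


-- ===== LEMMAS AND PROOFS =====

-- the multiset of dolls in column j (top-down), zeros skipped
def colNZ (g : List (List Int)) (j : Nat) : List Int :=
  (g.map (fun r => r.getD j 0)).filter (fun v => v != 0)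

-- loop invariant tying A's state (answer, bucket, stripped columns) to B's (answer, stack, grid)
def InvAB (n : Nat) (A B : Int × List Int × List (List Int)) : Prop :=
  B.1 = A.1 ∧ B.2.1 = A.2.1.reverse ∧ A.2.1.IsChain (· ≠ ·) ∧
  A.2.2.length = n ∧ (∀ r ∈ B.2.2, r.length = n) ∧
  (∀ j, j < n → A.2.2.getD j [] = colNZ B.2.2 j)

lemma filter_erase_zero (l : List Int) :
    (l.erase 0).filter (fun v => v != 0) = l.filter (fun v => v != 0) := by
  induction l with
  | nil => simp
  | cons x xs ih =>
    by_cases hx : x = 0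
    · subst hx; simp [List.erase_cons]
    · simp [List.erase_cons, hx, List.filter_cons, ih]

lemma stripZeros_eq (l : List Int) : stripZeros l = l.filter (fun v => v != 0) := by
  induction l using stripZeros.induct with
  | case1 l h ih =>
    rw [stripZeros]; simp only [h, dite_true]
    rw [ih, filter_erase_zero]
  | case2 l h =>
    rw [stripZeros]; simp only [h, dite_false]
    exact (List.filter_eq_self.mpr (fun v hv => by simpa using fun (e : v = 0) => h (e ▸ hv))).symm

lemma pyIdx?_spec (n : Nat) (i : Int) (h : PySem.Raise.InRange n i) :
    ∃ j : Nat, PySem.List.pyIdx? n i = some j ∧ j < n := by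
  obtain ⟨h1, h2⟩ := h
  by_cases hi : 0 ≤ i
  · exact ⟨i.toNat, by simp [PySem.List.pyIdx?, hi, h2], by omega⟩
  · exact ⟨n - (-i).toNat, by simp [PySem.List.pyIdx?, hi, h1], by omega⟩

lemma pyGet?_of_idx {α : Type} (r : List α) (i : Int) (j : Nat) (d : α)
    (hj : PySem.List.pyIdx? r.length i = some j) (hlt : j < r.length) :
    PySem.List.pyGet? r i = some (r.getD j d) := by
  simp [PySem.List.pyGet?, hj, List.getElem?_eq_getElem hlt, List.getD_eq_getElem?_getD]

lemma pySetD_of_idx {α : Type} (r : List α) (i : Int) (v : α) (j : Nat)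
    (hj : PySem.List.pyIdx? r.length i = some j) :
    PySem.List.pySetD r i v = r.set j v := by
  simp [PySem.List.pySetD, PySem.List.pySet?, hj]

lemma colNZ_cons (r : List Int) (g : List (List Int)) (j : Nat) :
    colNZ (r :: g) j =
      if r.getD j 0 != 0 then r.getD j 0 :: colNZ g j else colNZ g j := by
  simp [colNZ, List.filter_cons]

lemma getD_set_self (r : List Int) (j : Nat) (v : Int) (h : j < r.length) :
    (r.set j v).getD j 0 = v := by
  simp [List.getD_eq_getElem?_getD, List.getElem?_set_self, h]

lemma getD_set_ne (r : List Int) (j k : Nat) (v : Int) (h : k ≠ j) :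
    (r.set j v).getD k 0 = r.getD k 0 := by
  simp [List.getD_eq_getElem?_getD, List.getElem?_set_ne (by omega : j ≠ k)]

lemma pluck_spec (n : Nat) (i : Int) (j : Nat)
    (hj : PySem.List.pyIdx? n i = some j) (hjn : j < n) :
    ∀ (g : List (List Int)), (∀ r ∈ g, r.length = n) →
    (colNZ g j = [] → pluck i g = none) ∧
    (∀ v rest, colNZ g j = v :: rest →
      ∃ g', pluck i g = some (g', v) ∧ (∀ r ∈ g', r.length = n) ∧
        colNZ g' j = rest ∧ (∀ k, k ≠ j → colNZ g' k = colNZ g k)) := by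
  intro g
  induction g with
  | nil =>
    intro _
    exact ⟨fun _ => rfl, fun v rest hc => by simp [colNZ] at hc⟩
  | cons r rs ih =>
    intro hg
    have hr : r.length = n := hg r (by simp)
    have hget : PySem.List.pyGet? r i = some (r.getD j 0) :=
      pyGet?_of_idx r i j 0 (by rw [hr]; exact hj) (by omega)
    have ihs := ih (fun r' hr' => hg r' (by simp [hr']))
    by_cases hv : r.getD j 0 = 0
    · have hv' : r[j]?.getD 0 = 0 := by simpa using hv
      constructor
      · intro hc
        have hc' : colNZ rs j = [] := by rw [colNZ_cons, hv] at hc; simpa using hc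
        simp [pluck, hget, hv', ihs.1 hc']
      · intro v rest hc
        have hc' : colNZ rs j = v :: rest := by rw [colNZ_cons, hv] at hc; simpa using hc
        obtain ⟨g', h1, h2, h3, h4⟩ := ihs.2 v rest hc'
        refine ⟨r :: g', by simp [pluck, hget, hv', h1], ?_, ?_, ?_⟩
        · intro r' hr'; rcases List.mem_cons.mp hr' with h | h
          · simpa [h] using hr
          · exact h2 r' h
        · rw [colNZ_cons, hv]; simpa using h3
        · intro k hk; rw [colNZ_cons, colNZ_cons, h4 k hk]
    · have hv' : ¬ r[j]?.getD 0 = 0 := by simpa using hv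
      have hpl : pluck i (r :: rs) = some (r.set j 0 :: rs, r.getD j 0) := by
        simp [pluck, hget, hv', pySetD_of_idx r i 0 j (by rw [hr]; exact hj),
          List.getD_eq_getElem?_getD]
      constructor
      · intro hc
        rw [colNZ_cons, if_pos (by simpa using hv)] at hc
        exact absurd hc (by simp)
      · intro v rest hc
        rw [colNZ_cons, if_pos (by simpa using hv)] at hc
        injection hc with hveq hrest
        refine ⟨r.set j 0 :: rs, by rw [hpl, hveq], ?_, ?_, ?_⟩
        · intro r' hr'; rcases List.mem_cons.mp hr' with h | h
          · simp [h, hr]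
          · exact hg r' (by simp [h])
        · rw [colNZ_cons, getD_set_self r j 0 (by omega)]; simpa using hrest
        · intro k hk
          rw [colNZ_cons, colNZ_cons, getD_set_ne r j k 0 hk]

lemma pyGetD_concat2_neg1 (bs : List Int) (t v : Int) :
    PySem.List.pyGetD (bs ++ [t, v]) (-1) 0 = v := by
  have : bs ++ [t, v] = (bs ++ [t]) ++ [v] := by simp
  rw [this, PySem.List.pyGetD_neg_one_append_singleton]

lemma pyGetD_concat2_neg2 (bs : List Int) (t v : Int) :
    PySem.List.pyGetD (bs ++ [t, v]) (-2) 0 = t := by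
  rw [PySem.List.pyGetD_neg_ofNat (bs ++ [t, v]) 2 0 (by omega) (by simp)]
  simp [List.getElem_append]

lemma checkA_of_chain (ans : Int) (bucket : List Int)
    (hC : bucket.IsChain (· ≠ ·)) : checkA ans bucket = (ans, bucket) := by
  rcases hrev : bucket.reverse with _ | ⟨v, bs⟩
  · have : bucket = [] := by simpa using congrArg List.reverse hrev
    simp [this, checkA]
  · rcases bs with _ | ⟨t, ws⟩
    · have : bucket = [v] := by
        have := congrArg List.reverse hrev; simpa using this
      simp [this, checkA]
    · have hb : bucket = ws.reverse ++ [t, v] := by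
        have := congrArg List.reverse hrev; simpa using this
      have htv : t ≠ v := by
        rw [hb] at hC
        have := (List.isChain_append.mp hC).2.1
        simpa [List.isChain_pair] using this
      rw [hb]
      simp [checkA, pyGetD_concat2_neg1, pyGetD_concat2_neg2, htv]

lemma step_equiv (n : Nat) (m : Int) (hm : PySem.Raise.InRange n (m - 1))
    (A B : Int × List Int × List (List Int)) (h : InvAB n A B) :
    InvAB n (stepA A m) (stepB B m) := by
  obtain ⟨ans, bucket, cols⟩ := A
  obtain ⟨ansB, bktB, grid⟩ := B
  obtain ⟨e1, e2, hC, hlen, hrows, hcols⟩ := h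
  have e1' : ansB = ans := e1
  have e2' : bktB = bucket.reverse := e2
  rw [e1', e2']
  simp only at hC hlen hrows hcols
  obtain ⟨j, hj, hjn⟩ := pyIdx?_spec n (m - 1) hm
  have hget : PySem.List.pyGet? cols (m - 1) = some (cols.getD j []) :=
    pyGet?_of_idx cols (m - 1) j [] (by rw [hlen]; exact hj) (by omega)
  have hcol : cols.getD j [] = colNZ grid j := hcols j hjn
  have hpl := pluck_spec n (m - 1) j hj hjn grid hrows
  rcases hc : colNZ grid j with _ | ⟨v, rest⟩
  · -- empty column: A appends nothing, B plucks nothing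
    have : stepA (ans, bucket, cols) m = (ans, bucket, cols) := by
      simp only [stepA, hget, hcol, hc, checkA_of_chain ans bucket hC]
    rw [this]
    have : stepB (ans, bucket.reverse, grid) m = (ans, bucket.reverse, grid) := by
      simp only [stepB, hpl.1 hc]
    rw [this]
    exact ⟨rfl, rfl, hC, hlen, hrows, hcols⟩
  · obtain ⟨g', hg1, hg2, hg3, hg4⟩ := hpl.2 v rest hc
    have hset : PySem.List.pySetD cols (m - 1) rest = cols.set j rest :=
      pySetD_of_idx cols (m - 1) rest j (by rw [hlen]; exact hj)
    have hA : stepA (ans, bucket, cols) m =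
        ((checkA ans (bucket ++ [v])).1, (checkA ans (bucket ++ [v])).2, cols.set j rest) := by
      simp only [stepA, hget, hcol, hc, hset]
    have hcols' : ∀ k, k < n → (cols.set j rest).getD k [] = colNZ g' k := by
      intro k hk
      by_cases hkj : k = j
      · subst hkj
        rw [List.getD_eq_getElem?_getD]
        simp [List.getElem?_set_self, show k < cols.length by omega, hg3]
      · rw [hg4 k hkj, ← hcols k hk, List.getD_eq_getElem?_getD,
          List.getElem?_set_ne (by omega : j ≠ k), ← List.getD_eq_getElem?_getD]
    have hlen' : (cols.set j rest).length = n := by simpa using hlen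
    rcases hrev : bucket.reverse with _ | ⟨t, bs⟩
    · -- empty bucket
      have hbnil : bucket = [] := by simpa using congrArg List.reverse hrev
      subst hbnil
      rw [hA]
      have hB : stepB (ans, [], grid) m = (ans, [v], g') := by
        simp [stepB, hg1]
      rw [hB]
      refine ⟨?_, ?_, ?_, hlen', hg2, hcols'⟩ <;>
        simp [checkA, List.isChain_singleton]
    · have hb : bucket = bs.reverse ++ [t] := by
        have := congrArg List.reverse hrev; simpa using this
      have hbv : bucket ++ [v] = bs.reverse ++ [t, v] := by rw [hb]; simp
      by_cases htv : t = v
      · -- cancel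
        have hchk : checkA ans (bucket ++ [v]) = (ans + 2, bs.reverse) := by
          rw [hbv]
          simp [checkA, pyGetD_concat2_neg1, pyGetD_concat2_neg2, htv,
            List.dropLast_concat, show bs.reverse ++ [t, v] = (bs.reverse ++ [t]) ++ [v] by simp]
        have hB : stepB (ans, t :: bs, grid) m = (ans + 2, bs, g') := by
          simp [stepB, hg1, htv]
        rw [hA, hB, hchk]
        have hCbs : bs.reverse.IsChain (· ≠ ·) := by
          rw [hb] at hC; exact hC.left_of_append
        exact ⟨rfl, by simp, hCbs, hlen', hg2, hcols'⟩
      · -- push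
        have hchk : checkA ans (bucket ++ [v]) = (ans, bucket ++ [v]) := by
          rw [hbv]
          simp [checkA, pyGetD_concat2_neg1, pyGetD_concat2_neg2, htv]
        have hB : stepB (ans, t :: bs, grid) m = (ans, v :: t :: bs, g') := by
          simp [stepB, hg1, htv]
        rw [hA, hB, hchk]
        have hCb : (bucket ++ [v]).IsChain (· ≠ ·) := by
          rw [List.isChain_append]
          refine ⟨hC, by simp, ?_⟩
          intro x hx y hy
          rw [hb] at hx
          simp [List.getLast?_concat] at hx
          simp at hy
          subst hx; subst hy; exact htv
        refine ⟨rfl, ?_, hCb, hlen', hg2, hcols'⟩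
        simp [hrev]
    
lemma foldl_equiv (n : Nat) (moves : List Int)
    (hm : ∀ m ∈ moves, PySem.Raise.InRange n (m - 1)) :
    ∀ A B, InvAB n A B → InvAB n (moves.foldl stepA A) (moves.foldl stepB B) := by
  induction moves with
  | nil => intro A B h; exact h
  | cons m ms ih =>
    intro A B h
    exact ih (fun x hx => hm x (by simp [hx]))
      _ _ (step_equiv n m (hm m (by simp)) A B h)

lemma foldl_min_le (xs : List Nat) : ∀ a : Nat,
    xs.foldl min a ≤ a ∧ ∀ x ∈ xs, xs.foldl min a ≤ x := by
  induction xs with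
  | nil => intro a; simp
  | cons y ys ih =>
    intro a
    obtain ⟨h1, h2⟩ := ih (min a y)
    refine ⟨le_trans h1 (by omega), ?_⟩
    intro x hx
    rcases List.mem_cons.mp hx with h | h
    · subst h; simpa using le_trans h1 (by omega)
    · simpa using h2 x h

lemma minLenB_le (board : List (List Int)) (r : List Int) (hr : r ∈ board) :
    minLenB board ≤ r.length := by
  rcases board with _ | ⟨b, bs⟩
  · simp at hr
  · have : minLenB (b :: bs) = (bs.map List.length).foldl min b.length := by
      simp [minLenB]
    rw [this]
    rcases List.mem_cons.mp hr with h | h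
    · subst h; exact (foldl_min_le (bs.map List.length) r.length).1
    · exact (foldl_min_le (bs.map List.length) b.length).2 r.length (List.mem_map_of_mem h)

lemma minLen_eq (b : List Int) (bs : List (List Int)) :
    minLenA b bs = minLenB (b :: bs) := by
  simp [minLenA, minLenB, List.foldl_map]

lemma min?_getD_eq (board : List (List Int)) :
    ((board.map List.length).min?).getD 0 = minLenB board := by
  rcases board with _ | ⟨b, bs⟩
  · simp [minLenB]
  · rw [List.map_cons, List.min?_cons']
    simp [minLenB, List.foldl_map]

lemma getD_take (r : List Int) (n j : Nat) (hj : j < n) (hn : n ≤ r.length) :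
    (r.take n).getD j 0 = r.getD j 0 := by
  rw [List.getD_eq_getElem?_getD, List.getD_eq_getElem?_getD, List.getElem?_take_of_lt hj]

lemma init_inv (board : List (List Int)) :
    InvAB (minLenB board) (0, [], (zipStar board).map stripZeros)
      (0, [], board.map (fun row => row.take (minLenB board))) := by
  refine ⟨rfl, rfl, by simp, ?_, ?_, ?_⟩
  · rcases board with _ | ⟨b, bs⟩
    · simp [zipStar, minLenB]
    · simp [zipStar, minLen_eq]
  · intro r hr
    simp only [List.mem_map] at hr
    obtain ⟨row, hrow, rfl⟩ := hr
    simpa using minLenB_le board row hrow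
  · intro j hj
    rcases hz : board with _ | ⟨b, bs⟩
    · rw [hz] at hj; simp [minLenB] at hj
    · rw [← hz]
      have hzs : (zipStar board).map stripZeros =
          (List.range (minLenB board)).map
            (fun j => stripZeros (board.map (fun row => row.getD j 0))) := by
        rw [hz]; simp [zipStar, minLen_eq, List.map_map]
      rw [hzs, List.getD_eq_getElem?_getD, List.getElem?_map, List.getElem?_range hj]
      simp only [Option.map_some, Option.getD_some]
      rw [stripZeros_eq, colNZ, List.map_map]
      congr 1
      apply List.map_congr_left
      intro row hrow
      exact (getD_take row (minLenB board) j hj (minLenB_le board row hrow)).symm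

-- ===== VERDICT (by name: the statement is the Claim_ definition above) =====
theorem solution_spec : Claim_equal_solution := by
  intro board moves _ hpre
  unfold Spec_solution solution solution_alt
  have hmv : ∀ m ∈ moves, PySem.Raise.InRange (minLenB board) (m - 1) := by
    intro m hm
    have := hpre m hm
    rwa [min?_getD_eq board] at this
  exact ((foldl_equiv (minLenB board) moves hmv _ _ (init_inv board)).1).symm
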